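-- pv_equiv track=rewrite | github.com/Rachel-3/2024-Algorithm-Study | chaerim/Programmers/Level_1/Lv1_PCCE_기출문제_10번_공원.py | solution
-- ===== SOURCE A (Python) =====
-- def solution(mats, park):
--     answer = 0
--
--     n, m = len(park), len(park[0])
--     dp = [[0] * m for _ in range(n)]
--
--     max_mat_size = 0
--     for i in range(n):
--         for j in range(m):
--             if park[i][j] == '-1':
--                 if i == 0 or j == 0:
--                     dp[i][j] = 1
--                 else:
--                     dp[i][j] = min(dp[i-1][j-1], dp[i-1][j], dp[i][j-1]) + 1
--                 max_mat_size = max(max_mat_size, dp[i][j])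
--
--     mats.sort(reverse = True)
--     for mat in mats:
--         if mat <= max_mat_size:
--             return mat
--
--     return -1
-- ===== SOURCE B (Python) =====
-- # B: 2D prefix-sum table of empty cells + binary search on the square side (feasibility
-- # of a side is monotone), instead of A's maximal-square DP; the answer is a direct max
-- # over the mats that fit. Return-value equivalence only: A sorts `mats` in place, B does not.
-- def solution(mats, park):
--     n, m = len(park), len(park[0])
--     # P[i][j] = number of '-1' cells among park[a][b] with a < i, b < j
--     P = [[0] * (m + 1)]
--     for i in range(n):
--         rp = [0]
--         for j in range(m):
--             rp.append(rp[j] + (1 if park[i][j] == '-1' else 0))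
--         P.append([P[i][j] + rp[j] for j in range(m + 1)])
--
--     def ok(k):
--         # is some k x k block entirely '-1'?
--         for i in range(n - k + 1):
--             for j in range(m - k + 1):
--                 if P[i + k][j + k] - P[i][j + k] - P[i + k][j] + P[i][j] == k * k:
--                     return True
--         return False
--
--     lo, hi = 0, min(n, m)
--     while lo < hi:
--         mid = (lo + hi + 1) // 2
--         if ok(mid):
--             lo = mid
--         else:
--             hi = mid - 1
--
--     return max((x for x in mats if x <= lo), default=-1)
-- ===== Notes on version B (the rewrite author's own statement) =====
-- stated objective: alternative
-- what changed: B replaces A's maximal-square DP table by a 2D prefix-sum table of empty cells plus a binary search for the largest side k whose k×k block sum reaches k² (feasibility is monotone in k), and picks the answer as a direct max over the mats that fit instead of A's reverse-sort-then-scan (B also does not mutate mats).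
import Mathlib
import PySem

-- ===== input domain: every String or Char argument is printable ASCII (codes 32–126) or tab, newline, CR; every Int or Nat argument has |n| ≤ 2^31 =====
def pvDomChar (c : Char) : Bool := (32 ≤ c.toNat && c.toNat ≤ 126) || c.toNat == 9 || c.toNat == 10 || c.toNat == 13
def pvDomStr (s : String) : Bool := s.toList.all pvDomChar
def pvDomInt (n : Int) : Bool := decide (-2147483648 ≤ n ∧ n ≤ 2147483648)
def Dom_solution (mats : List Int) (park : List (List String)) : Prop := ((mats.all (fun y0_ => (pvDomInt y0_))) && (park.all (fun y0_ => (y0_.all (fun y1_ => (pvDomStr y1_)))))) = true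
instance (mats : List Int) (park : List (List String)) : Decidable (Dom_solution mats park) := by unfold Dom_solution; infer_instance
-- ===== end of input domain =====

-- B replaces A's maximal-square DP table by a 2D prefix-sum table of empty cells plus a
-- binary search on the square side (feasibility is monotone), and a direct max over the
-- mats that fit (objective: alternative). Return values only: A sorts `mats` in place, B does not.

-- ===== PORT A =====
-- one iteration of A's inner `for j in range(m)` body; state = (dp, max_mat_size)
def solStepA (park : List (List String)) (i : Nat) (st : List (List Int) × Int) (j : Nat) : List (List Int) × Int :=
  if (park.getD i []).getD j "" = "-1" then
    let v : Int :=
      if i = 0 ∨ j = 0 then 1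
      else min ((st.1.getD (i-1) []).getD (j-1) 0)
             (min ((st.1.getD (i-1) []).getD j 0) ((st.1.getD i []).getD (j-1) 0)) + 1
    (st.1.set i ((st.1.getD i []).set j v), max st.2 v)
  else st

-- A's trailing `for mat in mats: if mat <= max_mat_size: return mat` / `return -1`
def solFirstLe (c : Int) : List Int → Int
  | [] => -1
  | x :: xs => if x ≤ c then x else solFirstLe c xs

def solution (mats : List Int) (park : List (List String)) : Int :=
  let n := park.length
  let m := (park.headD []).length
  let dp0 : List (List Int) := List.replicate n (List.replicate m 0)
  let res := (List.range n).foldl (fun st i => (List.range m).foldl (solStepA park i) st) (dp0, 0)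
  solFirstLe res.2 (PySem.List.sorted mats (fun x => x) true)

-- ===== PORT B =====
-- Source B's inner loop building the row prefix `rp` of row i (rp[j] = empties among the first j cells)
def bRowPref (park : List (List String)) (i m : Nat) : List Int :=
  (List.range m).foldl
    (fun rp j => rp ++ [rp.getD j 0 + (if (park.getD i []).getD j "" = "-1" then 1 else 0)]) [0]

-- Source B's outer loop building the (n+1)×(m+1) prefix-sum table P
def bTable (park : List (List String)) (n m : Nat) : List (List Int) :=
  (List.range n).foldl
    (fun P i =>
      let rp := bRowPref park i m
      P ++ [(List.range (m+1)).map (fun j => (P.getD i []).getD j 0 + rp.getD j 0)])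
    [List.replicate (m+1) 0]

-- Source B's `ok(k)`: some k×k block has prefix sum k²  (range(n-k+1) is empty for k > n)
def bOk (P : List (List Int)) (n m k : Nat) : Bool :=
  (List.range (n + 1 - k)).any (fun i =>
    (List.range (m + 1 - k)).any (fun j =>
      ((P.getD (i+k) []).getD (j+k) 0 - (P.getD i []).getD (j+k) 0
        - (P.getD (i+k) []).getD j 0 + (P.getD i []).getD j 0) == ((k : Int) * k)))

-- Source B's `while lo < hi` binary search for the largest feasible side; the loop shrinks
-- hi - lo each iteration, so fuel = hi - lo + 1 steps suffice (structural recursion on fuel)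
def bSearch (fuel : Nat) (ok : Nat → Bool) (lo hi : Nat) : Nat :=
  match fuel with
  | 0 => lo
  | fuel + 1 =>
    if lo < hi then
      let mid := (lo + hi + 1) / 2
      if ok mid then bSearch fuel ok mid hi else bSearch fuel ok lo (mid - 1)
    else lo

def solution_alt (mats : List Int) (park : List (List String)) : Int :=
  let n := park.length
  let m := (park.headD []).length
  let P := bTable park n m
  let best := bSearch (min n m + 1) (fun k => bOk P n m k) 0 (min n m)
  PySem.List.maxD (mats.filter (fun x => x ≤ (best : Int))) (fun x => x) (-1)

-- ===== PRECONDITION & SPEC =====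
-- Pre_ excludes exactly the inputs where the Python A raises IndexError: an empty park
-- (park[0]) and a park with some row shorter than the first one (park[i][j], j < m).
def Pre_solution (mats : List Int) (park : List (List String)) : Prop :=
  park ≠ [] ∧ ∀ row ∈ park, (park.headD []).length ≤ row.length
instance (mats : List Int) (park : List (List String)) : Decidable (Pre_solution mats park) := by unfold Pre_solution; infer_instance
def pvWitness_solution : List Int × List (List String) := ([5, 1, 3], [["-1", "-1", "A"], ["-1", "-1", "0"]])

def Spec_solution (mats : List Int) (park : List (List String)) (out : Int) : Prop := out = solution_alt mats park
instance (mats : List Int) (park : List (List String)) (out : Int) : Decidable (Spec_solution mats park out) := by unfold Spec_solution; infer_instance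

-- ===== CLAIM (what is proved, stated in full; the proofs are below) =====
def Claim_equal_solution : Prop := ∀ (mats : List Int) (park : List (List String)), Dom_solution mats park → Pre_solution mats park → Spec_solution mats park (solution mats park)

-- ===== LEMMAS AND PROOFS =====

-- the DP value A computes at each cell, as a recurrence on cell coordinates
def Dt (park : List (List String)) (i j : Nat) : Int :=
  if (park.getD i []).getD j "" = "-1" then
    if _h : i = 0 ∨ j = 0 then 1
    else min (Dt park (i-1) (j-1)) (min (Dt park (i-1) j) (Dt park i (j-1))) + 1
  else 0
termination_by (i, j)
decreasing_by all_goals (first | (apply Prod.Lex.left; omega) | (apply Prod.Lex.right; omega))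

-- ---- A side: the fold computes the table of Dt and its running max (as in the previous proof) ----
def rowP (P : List (List String)) (m i j0 : Nat) : List Int :=
  (List.range m).map (fun j => if j < j0 then Dt P i j else 0)

def dpM (P : List (List String)) (n m i j0 : Nat) : List (List Int) :=
  (List.range n).map (fun i' => if i' < i then rowP P m i' m else if i' = i then rowP P m i j0 else List.replicate m 0)

lemma rowP_zero (P : List (List String)) (m i : Nat) : rowP P m i 0 = List.replicate m 0 := by
  simp [rowP, List.map_const']

lemma rowP_succ (P : List (List String)) (m i j0 : Nat) (hj : j0 < m) :
    rowP P m i (j0+1) = (rowP P m i j0).set j0 (Dt P i j0) := by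
  apply List.ext_getElem (by simp [rowP])
  intro k h1 h2
  simp only [rowP, List.getElem_set, List.getElem_map, List.getElem_range]
  split_ifs <;> simp_all <;> omega

lemma getD_dpM (P : List (List String)) (n m i j0 i' : Nat) (h : i' < n) :
    (dpM P n m i j0).getD i' [] =
      if i' < i then rowP P m i' m else if i' = i then rowP P m i j0 else List.replicate m 0 := by
  exact PySem.List.getD_map_range _ n i' [] h

lemma getD_rowP (P : List (List String)) (m i j0 j : Nat) (h : j < m) :
    (rowP P m i j0).getD j 0 = if j < j0 then Dt P i j else 0 := by
  exact PySem.List.getD_map_range _ m j 0 h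

lemma stepA_eq (P : List (List String)) (n m i j0 : Nat) (hi : i < n) (hj : j0 < m) (b : Int) (hb : 0 ≤ b) :
    solStepA P i (dpM P n m i j0, b) j0 = (dpM P n m i (j0+1), max b (Dt P i j0)) := by
  unfold solStepA
  by_cases hc : (P.getD i []).getD j0 "" = "-1"
  · have hrow : (dpM P n m i j0).getD i [] = rowP P m i j0 := by
      rw [getD_dpM P n m i j0 i hi]; simp
    have hv : (if i = 0 ∨ j0 = 0 then (1:Int)
        else min (((dpM P n m i j0).getD (i-1) []).getD (j0-1) 0)
          (min (((dpM P n m i j0).getD (i-1) []).getD j0 0)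
            (((dpM P n m i j0).getD i []).getD (j0-1) 0)) + 1) = Dt P i j0 := by
      by_cases hb0 : i = 0 ∨ j0 = 0
      · rw [Dt, if_pos hc, dif_pos hb0, if_pos hb0]
      · have hb1 : i ≠ 0 := fun h => hb0 (Or.inl h)
        have hb2 : j0 ≠ 0 := fun h => hb0 (Or.inr h)
        have hprev : (dpM P n m i j0).getD (i-1) [] = rowP P m (i-1) m := by
          rw [getD_dpM P n m i j0 (i-1) (by omega)]
          simp [show i - 1 < i by omega]
        rw [hrow, hprev, getD_rowP P m (i-1) m (j0-1) (by omega),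
            getD_rowP P m (i-1) m j0 hj, getD_rowP P m i j0 (j0-1) (by omega),
            if_neg hb0, if_pos (show j0-1 < m by omega), if_pos hj,
            if_pos (show j0-1 < j0 by omega)]
        conv_rhs => rw [Dt]
        rw [if_pos hc, dif_neg hb0]
    simp only [hc, if_true]
    refine Prod.ext ?_ ?_
    · show (dpM P n m i j0).set i (((dpM P n m i j0).getD i []).set j0 _) = dpM P n m i (j0+1)
      rw [hv, hrow, ← rowP_succ P m i j0 hj]
      apply List.ext_getElem (by simp [dpM])
      intro k h1 h2
      simp only [dpM, List.getElem_set, List.getElem_map, List.getElem_range]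
      split_ifs <;> first | rfl | omega
    · show max b _ = max b (Dt P i j0)
      rw [hv]
  · have hD : Dt P i j0 = 0 := by rw [Dt, if_neg hc]
    have hrow : rowP P m i (j0+1) = rowP P m i j0 := by
      apply List.ext_getElem (by simp [rowP])
      intro k h1 h2
      simp only [rowP, List.getElem_map, List.getElem_range]
      by_cases hk : k = j0
      · rw [if_pos (show k < j0 + 1 by omega), if_neg (show ¬ k < j0 by omega), hk, hD]
      · by_cases hlt : k < j0
        · rw [if_pos (show k < j0 + 1 by omega), if_pos hlt]
        · rw [if_neg (show ¬ k < j0 + 1 by omega), if_neg hlt]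
    have hdp : dpM P n m i (j0+1) = dpM P n m i j0 := by
      unfold dpM; rw [hrow]
    rw [if_neg hc, hdp, hD, max_eq_left hb]

lemma rowA_eq (P : List (List String)) (n m i : Nat) (hi : i < n) : ∀ j0, j0 ≤ m → ∀ b : Int, 0 ≤ b →
    (List.range j0).foldl (solStepA P i) (dpM P n m i 0, b) =
      (dpM P n m i j0, (List.range j0).foldl (fun a j => max a (Dt P i j)) b) := by
  intro j0
  induction j0 with
  | zero => intro _ b _; simp
  | succ j0 ih =>
    intro h b hb
    have hb' : 0 ≤ (List.range j0).foldl (fun a j => max a (Dt P i j)) b :=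
      le_trans hb (PySem.List.le_foldl_max_int (List.range j0) (fun j => Dt P i j) b).1
    rw [List.range_succ, List.foldl_append, ih (by omega) b hb]
    simp only [List.foldl_cons, List.foldl_nil]
    rw [stepA_eq P n m i j0 hi (by omega) _ hb']
    simp [List.foldl_append]

lemma dpM_m_eq (P : List (List String)) (n m i : Nat) : dpM P n m i m = dpM P n m (i+1) 0 := by
  unfold dpM
  apply List.map_congr_left
  intro k _
  split_ifs <;> first | rfl | omega | exact (rowP_zero P m _).symm | simp_all

lemma dpM_zero (P : List (List String)) (n m : Nat) :
    dpM P n m 0 0 = List.replicate n (List.replicate m 0) := by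
  apply List.ext_getElem (by simp [dpM])
  intro k h1 h2
  simp only [dpM, List.getElem_map, List.getElem_range, List.getElem_replicate]
  split_ifs <;> first | omega | rfl | exact rowP_zero P m _

lemma zero_le_outerA (P : List (List String)) (n m : Nat) : ∀ i0,
    (0:Int) ≤ (List.range i0).foldl (fun a i => (List.range m).foldl (fun a' j => max a' (Dt P i j)) a) 0 := by
  intro i0
  induction i0 with
  | zero => simp
  | succ i0 ih =>
    rw [List.range_succ, List.foldl_append]
    simp only [List.foldl_cons, List.foldl_nil]
    exact le_trans ih (PySem.List.le_foldl_max_int (List.range m) (fun j => Dt P i0 j) _).1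

lemma outerA_eq (P : List (List String)) (n m : Nat) : ∀ i0, i0 ≤ n →
    (List.range i0).foldl (fun st i => (List.range m).foldl (solStepA P i) st) (dpM P n m 0 0, 0) =
      (dpM P n m i0 0,
       (List.range i0).foldl (fun a i => (List.range m).foldl (fun a' j => max a' (Dt P i j)) a) 0) := by
  intro i0
  induction i0 with
  | zero => intro _; simp
  | succ i0 ih =>
    intro h
    rw [List.range_succ, List.foldl_append, ih (by omega)]
    simp only [List.foldl_cons, List.foldl_nil]
    rw [rowA_eq P n m i0 (by omega) m le_rfl _ (zero_le_outerA P n m i0), dpM_m_eq]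
    simp [List.foldl_append]

lemma foldl_nested_max (g : Nat → Nat → Int) (rows cols : List Nat) : ∀ a : Int,
    rows.foldl (fun acc i => cols.foldl (fun a' j => max a' (g i j)) acc) a
      = (rows.flatMap (fun i => cols.map (fun j => g i j))).foldl max a := by
  induction rows with
  | nil => intro a; simp
  | cons x t ih =>
    intro a
    simp only [List.flatMap_cons, List.foldl_append, List.foldl_cons, List.foldl_map]
    exact ih _

-- ---- tail: first element ≤ c of the reverse-sorted list = max of the elements ≤ c, default -1 ----
lemma firstLe_none (c : Int) : ∀ s : List Int, (∀ y ∈ s, ¬ y ≤ c) → solFirstLe c s = -1 := by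
  intro s
  induction s with
  | nil => intro _; rfl
  | cons x t ih =>
    intro h
    simp only [solFirstLe]
    rw [if_neg (h x (List.mem_cons_self))]
    exact ih (fun y hy => h y (List.mem_cons_of_mem _ hy))

lemma firstLe_spec (c : Int) : ∀ s : List Int, s.Pairwise (fun a b => b ≤ a) →
    ∀ y ∈ s, y ≤ c →
      solFirstLe c s ∈ s ∧ solFirstLe c s ≤ c ∧ ∀ z ∈ s, z ≤ c → z ≤ solFirstLe c s := by
  intro s
  induction s with
  | nil => intro _ y hy; exact absurd hy (List.not_mem_nil)
  | cons x t ih =>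
    intro hp y hy hyc
    rw [List.pairwise_cons] at hp
    simp only [solFirstLe]
    by_cases hx : x ≤ c
    · rw [if_pos hx]
      refine ⟨List.mem_cons_self, hx, ?_⟩
      intro z hz _
      rcases List.mem_cons.1 hz with rfl | hz'
      · exact le_rfl
      · exact hp.1 z hz'
    · rw [if_neg hx]
      have hyt : y ∈ t := by
        rcases List.mem_cons.1 hy with rfl | h'
        · exact absurd hyc hx
        · exact h'
      obtain ⟨h1, h2, h3⟩ := ih hp.2 y hyt hyc
      refine ⟨List.mem_cons_of_mem _ h1, h2, ?_⟩
      intro z hz hzc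
      rcases List.mem_cons.1 hz with rfl | hz'
      · exact absurd hzc hx
      · exact h3 z hz' hzc

lemma firstLe_eq_maxD (c : Int) (mats : List Int) :
    solFirstLe c (PySem.List.sorted mats (fun x => x) true) =
      PySem.List.maxD (mats.filter (fun x => x ≤ c)) (fun x => x) (-1) := by
  have hperm := PySem.List.sorted_perm mats (fun x => x) true
  have hpw := PySem.List.sorted_pairwise_rev mats (fun x => x)
  by_cases hex : ∃ y ∈ mats, y ≤ c
  · obtain ⟨y, hy, hyc⟩ := hex
    have hys : y ∈ PySem.List.sorted mats (fun x => x) true := hperm.mem_iff.2 hy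
    obtain ⟨h1, h2, h3⟩ := firstLe_spec c _ hpw y hys hyc
    have hfne : mats.filter (fun x => x ≤ c) ≠ [] := by
      intro hnil
      have := List.filter_eq_nil_iff.1 hnil y hy
      simp [hyc] at this
    obtain ⟨mx, hmx⟩ : ∃ mx, PySem.List.max? (mats.filter (fun x => x ≤ c)) (fun x => x) = some mx := by
      cases hq : PySem.List.max? (mats.filter (fun x => x ≤ c)) (fun x => x) with
      | none => exact absurd ((PySem.List.max?_eq_none_iff _ _).1 hq) hfne
      | some mx => exact ⟨mx, rfl⟩
    have hmxmem := PySem.List.max?_mem hmx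
    have hmxmax := PySem.List.max?_isMax hmx
    have hmxm : mx ∈ mats ∧ mx ≤ c := by
      have := List.mem_filter.1 hmxmem
      simpa using this
    have hr : PySem.List.maxD (mats.filter (fun x => x ≤ c)) (fun x => x) (-1) = mx := by
      simp [PySem.List.maxD, hmx]
    rw [hr]
    apply le_antisymm
    · have hrf : solFirstLe c (PySem.List.sorted mats (fun x => x) true) ∈ mats.filter (fun x => x ≤ c) := by
        rw [List.mem_filter]
        exact ⟨hperm.mem_iff.1 h1, by simpa using h2⟩
      exact hmxmax _ hrf
    · exact h3 mx (hperm.mem_iff.2 hmxm.1) hmxm.2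
  · push_neg at hex
    have hnone : ∀ y ∈ PySem.List.sorted mats (fun x => x) true, ¬ y ≤ c := by
      intro y hy
      exact not_le.2 (hex y (hperm.mem_iff.1 hy))
    rw [firstLe_none c _ hnone]
    have hnil : mats.filter (fun x => x ≤ c) = [] := by
      apply List.filter_eq_nil_iff.2
      intro y hy
      simpa using not_le.2 (hex y hy)
    rw [hnil]
    rfl

-- ---- B side: the table built by the fold is the table of double prefix sums ----
def indI (park : List (List String)) (a b : Nat) : Int :=
  if (park.getD a []).getD b "" = "-1" then 1 else 0

def Spre (park : List (List String)) (i j : Nat) : Int :=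
  ∑ a ∈ Finset.range i, ∑ b ∈ Finset.range j, indI park a b

lemma bRowPref_eq (park : List (List String)) (i : Nat) : ∀ m,
    bRowPref park i m = (List.range (m+1)).map (fun j => ∑ b ∈ Finset.range j, indI park i b) := by
  intro m
  induction m with
  | zero => simp [bRowPref]
  | succ m ih =>
    have hstep : bRowPref park i (m+1) = bRowPref park i m ++
        [(bRowPref park i m).getD m 0 + (if (park.getD i []).getD m "" = "-1" then 1 else 0)] := by
      unfold bRowPref
      rw [show List.range (m+1) = List.range m ++ [m] from List.range_succ, List.foldl_append]
      rfl
    rw [hstep, ih, PySem.List.getD_map_range _ (m+1) m 0 (by omega)]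
    rw [show List.range (m+1+1) = List.range (m+1) ++ [m+1] from List.range_succ, List.map_append]
    congr 1
    congr 1
    show _ = ∑ b ∈ Finset.range (m+1), indI park i b
    rw [Finset.sum_range_succ]
    rfl

lemma bTable_eq (park : List (List String)) (m : Nat) : ∀ n,
    bTable park n m = (List.range (n+1)).map (fun i => (List.range (m+1)).map (fun j => Spre park i j)) := by
  intro n
  induction n with
  | zero =>
    have h0 : (List.range (m+1)).map (fun j => Spre park 0 j) = List.replicate (m+1) 0 := by
      rw [List.map_congr_left (g := fun _ : Nat => (0:Int)) (fun j _ => by simp [Spre])]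
      rw [List.map_const', List.length_range]
    simp [bTable, h0]
  | succ n ih =>
    have hstep : bTable park (n+1) m = bTable park n m ++
        [(List.range (m+1)).map (fun j =>
          ((bTable park n m).getD n []).getD j 0 + (bRowPref park n m).getD j 0)] := by
      unfold bTable
      rw [show List.range (n+1) = List.range n ++ [n] from List.range_succ, List.foldl_append]
      rfl
    rw [hstep, ih]
    rw [show List.range (n+1+1) = List.range (n+1) ++ [n+1] from List.range_succ, List.map_append]
    congr 1
    congr 1
    rw [PySem.List.getD_map_range _ (n+1) n [] (by omega), bRowPref_eq]
    apply List.map_congr_left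
    intro j hj
    rw [List.mem_range] at hj
    rw [PySem.List.getD_map_range _ (m+1) j 0 (by omega), PySem.List.getD_map_range _ (m+1) j 0 (by omega)]
    show Spre park n j + _ = Spre park (n+1) j
    rw [Spre, Spre, Finset.sum_range_succ]

lemma getD_bTable (park : List (List String)) (n m i j : Nat) (hi : i ≤ n) (hj : j ≤ m) :
    ((bTable park n m).getD i []).getD j 0 = Spre park i j := by
  rw [bTable_eq, PySem.List.getD_map_range _ (n+1) i [] (by omega),
      PySem.List.getD_map_range _ (m+1) j 0 (by omega)]

-- a block sum by inclusion-exclusion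
lemma blocksum (park : List (List String)) (i j k : Nat) :
    Spre park (i+k) (j+k) - Spre park i (j+k) - Spre park (i+k) j + Spre park i j =
      ∑ a ∈ Finset.Ico i (i+k), ∑ b ∈ Finset.Ico j (j+k), indI park a b := by
  have hout : ∀ J, Spre park (i+k) J - Spre park i J = ∑ a ∈ Finset.Ico i (i+k), ∑ b ∈ Finset.range J, indI park a b := by
    intro J
    rw [Finset.sum_Ico_eq_sub _ (Nat.le_add_right i k)]
    rfl
  have hin : ∀ a, (∑ b ∈ Finset.range (j+k), indI park a b) - (∑ b ∈ Finset.range j, indI park a b)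
      = ∑ b ∈ Finset.Ico j (j+k), indI park a b := by
    intro a
    rw [Finset.sum_Ico_eq_sub _ (Nat.le_add_right j k)]
  have : Spre park (i+k) (j+k) - Spre park i (j+k) - (Spre park (i+k) j - Spre park i j)
      = ∑ a ∈ Finset.Ico i (i+k), ∑ b ∈ Finset.Ico j (j+k), indI park a b := by
    rw [hout (j+k), hout j, ← Finset.sum_sub_distrib]
    exact Finset.sum_congr rfl (fun a _ => hin a)
  linarith [this]

-- a sum of 0/1 values reaches the cardinality iff every value is 1
lemma sum01 {α : Type} [DecidableEq α] (s : Finset α) (f : α → Int)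
    (h : ∀ x ∈ s, f x = 0 ∨ f x = 1) :
    (∑ x ∈ s, f x = (s.card : Int)) ↔ ∀ x ∈ s, f x = 1 := by
  constructor
  · intro hsum
    by_contra hcon
    push_neg at hcon
    obtain ⟨x, hx, hfx⟩ := hcon
    have hfx0 : f x = 0 := (h x hx).resolve_right hfx
    have hsplit : ∑ y ∈ s.erase x, f y + f x = ∑ y ∈ s, f y := Finset.sum_erase_add s f hx
    have hbound : ∑ y ∈ s.erase x, f y ≤ ((s.erase x).card : Int) := by
      calc ∑ y ∈ s.erase x, f y ≤ ∑ _y ∈ s.erase x, (1:Int) := by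
            apply Finset.sum_le_sum
            intro y hy
            rcases h y (Finset.mem_of_mem_erase hy) with h0 | h1 <;> omega
        _ = ((s.erase x).card : Int) := by simp
    have hcard : (s.erase x).card = s.card - 1 := Finset.card_erase_of_mem hx
    have hcard1 : 1 ≤ s.card := Finset.card_pos.2 ⟨x, hx⟩
    rw [hcard] at hbound
    have : ((s.card - 1 : Nat) : Int) = (s.card : Int) - 1 := by omega
    omega
  · intro hall
    rw [Finset.sum_congr rfl hall]
    simp

def Feas (park : List (List String)) (n m k : Nat) : Prop :=
  ∃ i j, i + k ≤ n ∧ j + k ≤ m ∧ ∀ a < k, ∀ b < k, (park.getD (i+a) []).getD (j+b) "" = "-1"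

lemma block_iff (park : List (List String)) (i j k : Nat) :
    (Spre park (i+k) (j+k) - Spre park i (j+k) - Spre park (i+k) j + Spre park i j = (k:Int) * k) ↔
      ∀ a < k, ∀ b < k, (park.getD (i+a) []).getD (j+b) "" = "-1" := by
  rw [blocksum]
  rw [← Finset.sum_product']
  have hcard : ((Finset.Ico i (i+k)) ×ˢ (Finset.Ico j (j+k))).card = k * k := by
    rw [Finset.card_product, Nat.card_Ico, Nat.card_Ico]
    congr 1 <;> omega
  have h01 : ∀ x ∈ (Finset.Ico i (i+k)) ×ˢ (Finset.Ico j (j+k)), indI park x.1 x.2 = 0 ∨ indI park x.1 x.2 = 1 := by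
    intro x _
    unfold indI
    split_ifs <;> simp
  have := sum01 ((Finset.Ico i (i+k)) ×ˢ (Finset.Ico j (j+k))) (fun x => indI park x.1 x.2) h01
  rw [hcard] at this
  rw [show ((k:Int) * k) = ((k * k : Nat) : Int) by push_cast; ring, this]
  constructor
  · intro hall a ha b hb
    have := hall (i+a, j+b) (by
      rw [Finset.mem_product, Finset.mem_Ico, Finset.mem_Ico]
      constructor <;> constructor <;> omega)
    simp only [indI] at this
    by_contra hc
    rw [if_neg hc] at this
    omega
  · intro hall x hx
    rw [Finset.mem_product, Finset.mem_Ico, Finset.mem_Ico] at hx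
    have := hall (x.1 - i) (by omega) (x.2 - j) (by omega)
    rw [show i + (x.1 - i) = x.1 by omega, show j + (x.2 - j) = x.2 by omega] at this
    show indI park x.1 x.2 = 1
    unfold indI
    rw [if_pos this]

lemma bOk_iff (park : List (List String)) (n m k : Nat) (hkn : k ≤ n) (hkm : k ≤ m) :
    bOk (bTable park n m) n m k = true ↔ Feas park n m k := by
  unfold bOk Feas
  rw [List.any_eq_true]
  constructor
  · rintro ⟨i, hi, hinner⟩
    rw [List.any_eq_true] at hinner
    obtain ⟨j, hj, hval⟩ := hinner
    rw [List.mem_range] at hi hj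
    rw [beq_iff_eq] at hval
    refine ⟨i, j, by omega, by omega, ?_⟩
    rw [getD_bTable park n m (i+k) (j+k) (by omega) (by omega),
        getD_bTable park n m i (j+k) (by omega) (by omega),
        getD_bTable park n m (i+k) j (by omega) (by omega),
        getD_bTable park n m i j (by omega) (by omega)] at hval
    exact (block_iff park i j k).1 hval
  · rintro ⟨i, j, hi, hj, hall⟩
    refine ⟨i, List.mem_range.2 (by omega), ?_⟩
    rw [List.any_eq_true]
    refine ⟨j, List.mem_range.2 (by omega), ?_⟩
    rw [beq_iff_eq]
    rw [getD_bTable park n m (i+k) (j+k) (by omega) (by omega),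
        getD_bTable park n m i (j+k) (by omega) (by omega),
        getD_bTable park n m (i+k) j (by omega) (by omega),
        getD_bTable park n m i j (by omega) (by omega)]
    exact (block_iff park i j k).2 hall

lemma Feas_mono (park : List (List String)) (n m a b : Nat) (hab : a ≤ b) :
    Feas park n m b → Feas park n m a := by
  rintro ⟨i, j, hi, hj, hall⟩
  exact ⟨i, j, by omega, by omega, fun x hx y hy => hall x (by omega) y (by omega)⟩

-- ---- Dt characterised: Dt i j ≥ k iff the k×k square with bottom-right corner (i,j) is all '-1' ----
lemma Dt_nonneg (park : List (List String)) : ∀ s i j, i + j ≤ s → 0 ≤ Dt park i j := by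
  intro s
  induction s with
  | zero =>
    intro i j h
    have hi : i = 0 := by omega
    have hj : j = 0 := by omega
    subst hi; subst hj
    rw [Dt]
    split_ifs with h1 h2
    · norm_num
    · exact absurd (Or.inl rfl) h2
    · exact le_refl 0
  | succ s ih =>
    intro i j h
    rw [Dt]
    split_ifs with h1 h2
    · norm_num
    · have d1 := ih (i-1) (j-1) (by omega)
      have d2 := ih (i-1) j (by omega)
      have d3 := ih i (j-1) (by omega)
      have hm := le_min d1 (le_min d2 d3)
      linarith
    · exact le_refl 0

lemma Dt_ge_iff (park : List (List String)) : ∀ (s i j k : Nat), i + j ≤ s → 1 ≤ k →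
    ((k:Int) ≤ Dt park i j ↔
      (k ≤ i + 1 ∧ k ≤ j + 1 ∧ ∀ a < k, ∀ b < k, (park.getD (i-a) []).getD (j-b) "" = "-1")) := by
  intro s
  induction s with
  | zero =>
    intro i j k hs hk
    have hi : i = 0 := by omega
    have hj : j = 0 := by omega
    subst hi; subst hj
    rw [Dt]
    by_cases hc : (park.getD 0 []).getD 0 "" = "-1"
    · rw [if_pos hc, dif_pos (Or.inl rfl)]
      constructor
      · intro h
        have hk1 : k = 1 := by omega
        subst hk1
        exact ⟨by omega, by omega, fun a ha b hb => by
          have : a = 0 := by omega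
          have : b = 0 := by omega
          simp_all⟩
      · rintro ⟨h1, h2, _⟩
        have : k = 1 := by omega
        omega
    · rw [if_neg hc]
      constructor
      · intro h; omega
      · rintro ⟨h1, h2, hall⟩
        exact absurd (by simpa using hall 0 (by omega) 0 (by omega)) hc
  | succ s ih =>
    intro i j k hs hk
    rw [Dt]
    by_cases hc : (park.getD i []).getD j "" = "-1"
    · by_cases hb0 : i = 0 ∨ j = 0
      · rw [if_pos hc, dif_pos hb0]
        constructor
        · intro h
          have hk1 : k = 1 := by omega
          subst hk1
          refine ⟨by omega, by omega, fun a ha b hb => ?_⟩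
          have ha0 : a = 0 := by omega
          have hb0' : b = 0 := by omega
          simp_all
        · rintro ⟨h1, h2, _⟩
          have : k = 1 := by rcases hb0 with h | h <;> omega
          omega
      · rw [if_pos hc, dif_neg hb0]
        have hi1 : 1 ≤ i := by omega
        have hj1 : 1 ≤ j := by omega
        by_cases hk1 : k = 1
        · subst hk1
          have d1 := Dt_nonneg park s (i-1) (j-1) (by omega)
          have d2 := Dt_nonneg park s (i-1) j (by omega)
          have d3 := Dt_nonneg park s i (j-1) (by omega)
          constructor
          · intro _
            refine ⟨by omega, by omega, fun a ha b hb => ?_⟩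
            have : a = 0 := by omega
            have : b = 0 := by omega
            simp_all
          · intro _
            have hm := le_min d1 (le_min d2 d3)
            push_cast
            linarith
        · have hk2 : 2 ≤ k := by omega
          have i1 := ih (i-1) (j-1) (k-1) (by omega) (by omega)
          have i2 := ih (i-1) j (k-1) (by omega) (by omega)
          have i3 := ih i (j-1) (k-1) (by omega) (by omega)
          have hcast : ((k-1 : Nat) : Int) = (k : Int) - 1 := by omega
          rw [hcast] at i1 i2 i3
          constructor
          · intro h
            have hm1 := min_le_left (Dt park (i-1) (j-1)) (min (Dt park (i-1) j) (Dt park i (j-1)))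
            have hm2 := le_trans (min_le_right (Dt park (i-1) (j-1)) (min (Dt park (i-1) j) (Dt park i (j-1)))) (min_le_left (Dt park (i-1) j) (Dt park i (j-1)))
            have hm3 := le_trans (min_le_right (Dt park (i-1) (j-1)) (min (Dt park (i-1) j) (Dt park i (j-1)))) (min_le_right (Dt park (i-1) j) (Dt park i (j-1)))
            obtain ⟨h1a, h1b, h1c⟩ := i1.1 (by linarith)
            obtain ⟨h2a, h2b, h2c⟩ := i2.1 (by linarith)
            obtain ⟨h3a, h3b, h3c⟩ := i3.1 (by linarith)
            refine ⟨by omega, by omega, fun a ha b hb => ?_⟩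
            by_cases ha0 : a = 0
            · by_cases hb0' : b = 0
              · simp_all
              · -- a = 0, b ≥ 1 : cell (i, j-b) from square at (i, j-1)
                have := h3c a (by omega) (b-1) (by omega)
                rw [show j - 1 - (b-1) = j - b by omega] at this
                simpa [ha0] using this
            · by_cases hb0' : b = 0
              · have := h2c (a-1) (by omega) b (by omega)
                rw [show i - 1 - (a-1) = i - a by omega] at this
                simpa [hb0'] using this
              · have := h1c (a-1) (by omega) (b-1) (by omega)
                rw [show i - 1 - (a-1) = i - a by omega, show j - 1 - (b-1) = j - b by omega] at this
                exact this
          · rintro ⟨h1, h2, hall⟩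
            have c1 : (k:Int) - 1 ≤ Dt park (i-1) (j-1) := i1.2 ⟨by omega, by omega, fun a ha b hb => by
              have := hall (a+1) (by omega) (b+1) (by omega)
              rw [show i - (a+1) = i - 1 - a by omega, show j - (b+1) = j - 1 - b by omega] at this
              exact this⟩
            have c2 : (k:Int) - 1 ≤ Dt park (i-1) j := i2.2 ⟨by omega, by omega, fun a ha b hb => by
              have := hall (a+1) (by omega) b (by omega)
              rw [show i - (a+1) = i - 1 - a by omega] at this
              exact this⟩
            have c3 : (k:Int) - 1 ≤ Dt park i (j-1) := i3.2 ⟨by omega, by omega, fun a ha b hb => by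
              have := hall a (by omega) (b+1) (by omega)
              rw [show j - (b+1) = j - 1 - b by omega] at this
              exact this⟩
            have hm := le_min c1 (le_min c2 c3)
            linarith
    · rw [if_neg hc]
      constructor
      · intro h; omega
      · rintro ⟨h1, h2, hall⟩
        have := hall 0 (by omega) 0 (by omega)
        simp only [Nat.sub_zero] at this
        exact absurd this hc

lemma Feas_iff_Dt (park : List (List String)) (n m k : Nat) (hk : 1 ≤ k) :
    Feas park n m k ↔ ∃ i < n, ∃ j < m, (k:Int) ≤ Dt park i j := by
  constructor
  · rintro ⟨i, j, hi, hj, hall⟩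
    refine ⟨i + k - 1, by omega, j + k - 1, by omega, ?_⟩
    rw [Dt_ge_iff park (i + k - 1 + (j + k - 1)) _ _ k le_rfl hk]
    refine ⟨by omega, by omega, fun a ha b hb => ?_⟩
    have := hall (k - 1 - a) (by omega) (k - 1 - b) (by omega)
    rw [show i + (k - 1 - a) = i + k - 1 - a by omega,
        show j + (k - 1 - b) = j + k - 1 - b by omega] at this
    exact this
  · rintro ⟨i, hi, j, hj, hD⟩
    rw [Dt_ge_iff park (i + j) i j k le_rfl hk] at hD
    obtain ⟨h1, h2, hall⟩ := hD
    refine ⟨i + 1 - k, j + 1 - k, by omega, by omega, fun a ha b hb => ?_⟩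
    have := hall (k - 1 - a) (by omega) (k - 1 - b) (by omega)
    rw [show i - (k - 1 - a) = i + 1 - k + a by omega,
        show j - (k - 1 - b) = j + 1 - k + b by omega] at this
    exact this

-- ---- binary-search correctness ----
lemma bSearch_spec (ok : Nat → Bool) : ∀ f lo hi, hi - lo < f → lo ≤ hi → ok lo = true →
    (∀ a b, a ≤ b → b ≤ hi → ok b = true → ok a = true) →
    ok (bSearch f ok lo hi) = true ∧ lo ≤ bSearch f ok lo hi ∧ bSearch f ok lo hi ≤ hi ∧
      (∀ k, k ≤ hi → ok k = true → k ≤ bSearch f ok lo hi) := by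
  intro f
  induction f with
  | zero => intro lo hi hd; omega
  | succ f ih =>
    intro lo hi hd hle hok hmono
    by_cases hlh : lo < hi
    · rw [bSearch, if_pos hlh]
      simp only []
      by_cases hm : ok ((lo + hi + 1) / 2) = true
      · rw [if_pos hm]
        have := ih ((lo + hi + 1) / 2) hi (by omega) (by omega) hm hmono
        exact ⟨this.1, by omega, this.2.2.1, this.2.2.2⟩
      · rw [if_neg hm]
        have := ih lo ((lo + hi + 1) / 2 - 1) (by omega) (by omega) hok
          (fun a b hab hb hokb => hmono a b hab (by omega) hokb)
        refine ⟨this.1, this.2.1, by omega, fun k hk hokk => ?_⟩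
        have hkm : k ≤ (lo + hi + 1) / 2 - 1 := by
          by_contra hc
          exact hm (hmono ((lo + hi + 1) / 2) k (by omega) hk hokk)
        exact this.2.2.2 k hkm hokk
    · rw [bSearch, if_neg hlh]
      exact ⟨hok, le_rfl, by omega, fun k hk _ => by omega⟩

-- ---- putting it together: A's max DP value equals B's binary-search result ----
lemma best_eq (park : List (List String)) (n m : Nat) :
    (List.range n).foldl (fun a i => (List.range m).foldl (fun a' j => max a' (Dt park i j)) a) 0 =
      ((bSearch (min n m + 1) (fun k => bOk (bTable park n m) n m k) 0 (min n m) : Nat) : Int) := by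
  set best := (List.range n).foldl (fun a i => (List.range m).foldl (fun a' j => max a' (Dt park i j)) a) 0 with hbest
  set L := (List.range n).flatMap (fun i => (List.range m).map (fun j => Dt park i j)) with hL
  have hflat : best = L.foldl max 0 := foldl_nested_max (fun i j => Dt park i j) _ _ 0
  have hmemL : ∀ x, x ∈ L ↔ ∃ i < n, ∃ j < m, x = Dt park i j := by
    intro x
    simp only [hL, List.mem_flatMap, List.mem_map, List.mem_range]
    constructor
    · rintro ⟨i, hi, j, hj, rfl⟩; exact ⟨i, hi, j, hj, rfl⟩
    · rintro ⟨i, hi, j, hj, rfl⟩; exact ⟨i, hi, j, hj, rfl⟩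
  have hub : ∀ i < n, ∀ j < m, Dt park i j ≤ best := by
    intro i hi j hj
    rw [hflat]
    exact (PySem.List.le_foldl_max L 0).2 _ ((hmemL _).2 ⟨i, hi, j, hj, rfl⟩)
  have hnn : (0:Int) ≤ best := zero_le_outerA park n m n
  have hok0 : bOk (bTable park n m) n m 0 = true := by
    rw [bOk_iff park n m 0 (by omega) (by omega)]
    exact ⟨0, 0, by omega, by omega, fun a ha => by omega⟩
  have hmono : ∀ a b, a ≤ b → b ≤ min n m → bOk (bTable park n m) n m b = true →
      bOk (bTable park n m) n m a = true := by
    intro a b hab hb hokb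
    rw [bOk_iff park n m b (by omega) (by omega)] at hokb
    rw [bOk_iff park n m a (by omega) (by omega)]
    exact Feas_mono park n m a b hab hokb
  obtain ⟨hokr, _, hrhi, hrmax⟩ :=
    bSearch_spec (fun k => bOk (bTable park n m) n m k) (min n m + 1) 0 (min n m) (by omega) (by omega) hok0 hmono
  set r := bSearch (min n m + 1) (fun k => bOk (bTable park n m) n m k) 0 (min n m) with hr
  apply le_antisymm
  · -- best ≤ r
    rcases PySem.List.foldl_max_mem L 0 with he | hmem
    · rw [hflat, he]; omega
    · rw [← hflat] at hmem
      obtain ⟨i, hi, j, hj, hbij⟩ := (hmemL _).1 hmem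
      by_cases hz : best ≤ 0
      · omega
      · have hk1 : 1 ≤ best.toNat := by omega
        have hDt : ((best.toNat : Nat) : Int) ≤ Dt park i j := by rw [hbij] at *; omega
        have hsq := (Dt_ge_iff park (i+j) i j best.toNat le_rfl hk1).1 hDt
        have hfeas : Feas park n m best.toNat :=
          (Feas_iff_Dt park n m best.toNat hk1).2 ⟨i, hi, j, hj, hDt⟩
        have hbnd : best.toNat ≤ min n m := by
          obtain ⟨h1, h2, _⟩ := hsq
          omega
        have hokb : bOk (bTable park n m) n m best.toNat = true := by
          rw [bOk_iff park n m best.toNat (by omega) (by omega)]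
          exact hfeas
        have := hrmax best.toNat hbnd hokb
        omega
  · -- r ≤ best
    by_cases hr0 : r = 0
    · omega
    · have hk1 : 1 ≤ r := by omega
      have hfeas : Feas park n m r := by
        rw [← bOk_iff park n m r (by omega) (by omega)]
        exact hokr
      obtain ⟨i, hi, j, hj, hDt⟩ := (Feas_iff_Dt park n m r hk1).1 hfeas
      exact le_trans hDt (hub i hi j hj)

-- ===== VERDICT (by name: the statement is the Claim_ definition above) =====
theorem solution_spec : Claim_equal_solution := by
  intro mats park _hdom _hpre
  unfold Spec_solution solution solution_alt
  dsimp only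
  rw [← dpM_zero park park.length (park.headD []).length,
      outerA_eq park park.length (park.headD []).length park.length le_rfl]
  simp only
  rw [best_eq park park.length (park.headD []).length]
  exact firstLe_eq_maxD _ mats
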